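-- pv_equiv track=rewrite | github.com/andirs/rs2018 | src/generate_sequences.py | get_complete_testing_sets
-- ===== SOURCE A (Python) =====
-- def get_complete_testing_sets(playlists, test_indices_dict):
--     """
--     Generates dictionary with test buckets according to provided indices.
--     Adds additional seed and groundtruth lists to playlists.
--
--     Parameters:
--     --------------
--     playlists:         list, original playlists included in test set
--     test_indices_dict: dict, dictionary including the indices for every split
--
--     Returns:
--     --------------
--     return_dict:       dict, {bucket_no: [playlist1, playlist2, ..., playlistn], ...}
--     """
--     # prepare return_dict
--     return_dict = {}
--     for bucket in test_indices_dict.keys():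
--         return_dict[bucket] = [y for x, y in enumerate(playlists) if x in test_indices_dict[bucket]]
--
--     # add seed tracks and ground_truth to playlists
--     for key in return_dict.keys():
--         for playlist in return_dict[key]:
--             playlist['seed'] = [x for x in playlist['tracks'][:key]]
--             playlist['groundtruth'] = [x for x in playlist['tracks'][key:]]
--
--     return return_dict
-- ===== SOURCE B (Python) =====
-- def get_complete_testing_sets(playlists, test_indices_dict):
--     """Faster rewrite: select playlists per bucket from the sorted set of
--     in-range indices instead of scanning every playlist and doing a list
--     membership test per playlist.  Mutates the selected playlists in place
--     (adds 'seed'/'groundtruth'), like the original."""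
--     n = len(playlists)
--     sel = {k: sorted({i for i in idxs if 0 <= i < n})
--            for k, idxs in test_indices_dict.items()}
--     for k, s in sel.items():
--         for i in s:
--             p = playlists[i]
--             tr = p['tracks']
--             p['seed'] = list(tr[:k])
--             p['groundtruth'] = list(tr[k:])
--     return {k: [playlists[i] for i in s] for k, s in sel.items()}
-- ===== Notes on version B (the rewrite author's own statement) =====
-- stated objective: faster
-- what changed: Per bucket, B builds the selection as the sorted set of in-range indices taken straight from the bucket's index list (O(K log K)), instead of A's scan over all playlists with a list-membership test per playlist (O(N*M) per bucket); the seed/groundtruth pass is then driven by those index lists.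
import Mathlib
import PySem

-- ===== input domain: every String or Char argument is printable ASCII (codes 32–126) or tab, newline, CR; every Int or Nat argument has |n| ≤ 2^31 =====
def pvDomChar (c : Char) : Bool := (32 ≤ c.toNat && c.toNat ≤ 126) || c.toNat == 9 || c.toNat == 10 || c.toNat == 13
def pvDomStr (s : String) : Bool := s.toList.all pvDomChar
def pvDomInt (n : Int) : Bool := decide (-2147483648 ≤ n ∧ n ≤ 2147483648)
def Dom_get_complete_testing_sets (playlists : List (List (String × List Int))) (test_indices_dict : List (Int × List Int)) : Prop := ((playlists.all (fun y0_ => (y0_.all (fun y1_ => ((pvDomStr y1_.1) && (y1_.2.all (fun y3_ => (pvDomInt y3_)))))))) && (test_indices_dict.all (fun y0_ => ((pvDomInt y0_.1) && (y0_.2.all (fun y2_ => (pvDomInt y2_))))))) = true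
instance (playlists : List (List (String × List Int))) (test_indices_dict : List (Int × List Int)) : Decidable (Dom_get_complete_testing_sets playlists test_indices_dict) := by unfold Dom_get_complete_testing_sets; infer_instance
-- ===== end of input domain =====

-- B selects each bucket via the sorted set of in-range indices instead of A's scan of all
-- playlists with a list-membership test per playlist.  Both Pythons mutate the selected
-- playlist dicts in place (add 'seed'/'groundtruth'); the equivalence proved here is about
-- the RETURN value (the returned buckets hold references to those mutated dicts, which both
-- ports model by a playlist store indexed by position, materialized at return).

-- ===== PORT A =====
-- playlist['seed'] = [x for x in playlist['tracks'][:key]]; playlist['groundtruth'] = [x for x in playlist['tracks'][key:]]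
-- (playlist['tracks'] is read again after the 'seed' write, as in A; KeyError on a missing
-- 'tracks' key is excluded by Pre_, so the total getD form is exact there)
def pvSeedA (key : Int) (p : List (String × List Int)) : List (String × List Int) :=
  let d := PySem.Dict.mk p
  let d1 := d.insert "seed" (PySem.List.slice (d.getD "tracks" []) none (some key))
  let d2 := d1.insert "groundtruth" (PySem.List.slice (d1.getD "tracks" []) (some key) none)
  d2.items

def get_complete_testing_sets (playlists : List (List (String × List Int))) (test_indices_dict : List (Int × List Int)) : List (Int × List (List (String × List Int))) :=
  let td := PySem.Dict.ofList test_indices_dict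
  -- return_dict[bucket] = [y for x, y in enumerate(playlists) if x in test_indices_dict[bucket]]
  -- (the selected playlist OBJECTS, modeled by their indices into the store)
  let return_dict : PySem.Dict Int (List Int) :=
    td.keys.foldl (fun rd bucket =>
      rd.insert bucket (((PySem.List.enumerate playlists).filter
        (fun xy => (td.getD bucket []).contains xy.1)).map (fun xy => xy.1))) PySem.Dict.empty
  -- for key in return_dict.keys(): for playlist in return_dict[key]: … (in-place mutation)
  let store :=
    return_dict.keys.foldl (fun st key =>
      (return_dict.getD key []).foldl (fun st i =>
        PySem.List.pySetD st i (pvSeedA key (PySem.List.pyGetD st i []))) st) playlists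
  return_dict.keys.map (fun k => (k, (return_dict.getD k []).map (fun i => PySem.List.pyGetD store i [])))

-- ===== PORT B =====
-- tr = p['tracks']; p['seed'] = list(tr[:k]); p['groundtruth'] = list(tr[k:])
def pvSeedB (key : Int) (p : List (String × List Int)) : List (String × List Int) :=
  let d := PySem.Dict.mk p
  let tr := d.getD "tracks" []
  ((d.insert "seed" (PySem.List.slice tr none (some key))).insert "groundtruth"
    (PySem.List.slice tr (some key) none)).items

def get_complete_testing_sets_alt (playlists : List (List (String × List Int))) (test_indices_dict : List (Int × List Int)) : List (Int × List (List (String × List Int))) :=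
  let n : Int := PySem.List.len playlists
  -- sel = {k: sorted({i for i in idxs if 0 <= i < n}) for k, idxs in test_indices_dict.items()}
  let sel : List (Int × List Int) :=
    (PySem.Dict.ofList test_indices_dict).items.map (fun kv =>
      (kv.1, PySem.List.sorted (PySem.Set.ofList (kv.2.filter
        (fun i => decide (0 ≤ i) && decide (i < n)))) (fun x => x)))
  -- for k, s in sel.items(): for i in s: … (in-place mutation through the store)
  let store :=
    sel.foldl (fun st ks =>
      ks.2.foldl (fun st i =>
        PySem.List.pySetD st i (pvSeedB ks.1 (PySem.List.pyGetD st i []))) st) playlists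
  -- {k: [playlists[i] for i in s] for k, s in sel.items()}
  sel.map (fun ks => (ks.1, ks.2.map (fun i => PySem.List.pyGetD store i [])))

-- ===== PRECONDITION & SPEC =====
-- Pre_ excludes exactly the inputs where the Python raises KeyError: some bucket's index
-- list selects a playlist that has no 'tracks' key (both A and B raise there).
def Pre_get_complete_testing_sets (playlists : List (List (String × List Int))) (test_indices_dict : List (Int × List Int)) : Prop :=
  ∀ kv ∈ test_indices_dict, ∀ i ∈ kv.2, 0 ≤ i → i < (playlists.length : Int) →
    "tracks" ∈ (playlists.getD i.toNat []).map Prod.fst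
instance (playlists : List (List (String × List Int))) (test_indices_dict : List (Int × List Int)) : Decidable (Pre_get_complete_testing_sets playlists test_indices_dict) := by unfold Pre_get_complete_testing_sets; infer_instance

def pvWitness_get_complete_testing_sets : (List (List (String × List Int))) × (List (Int × List Int)) :=
  ([[("tracks", [1, 2, 3])], [("tracks", [4])]], [(1, [0, 1]), (2, [1, 5, -1])])

def Spec_get_complete_testing_sets (playlists : List (List (String × List Int))) (test_indices_dict : List (Int × List Int)) (out : List (Int × List (List (String × List Int)))) : Prop := out = get_complete_testing_sets_alt playlists test_indices_dict
instance (playlists : List (List (String × List Int))) (test_indices_dict : List (Int × List Int)) (out : List (Int × List (List (String × List Int)))) : Decidable (Spec_get_complete_testing_sets playlists test_indices_dict out) := by unfold Spec_get_complete_testing_sets; infer_instance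

-- ===== CLAIM (what is proved, stated in full; the proofs are below) =====
def Claim_equal_get_complete_testing_sets : Prop := ∀ (playlists : List (List (String × List Int))) (test_indices_dict : List (Int × List Int)), Dom_get_complete_testing_sets playlists test_indices_dict → Pre_get_complete_testing_sets playlists test_indices_dict → Spec_get_complete_testing_sets playlists test_indices_dict (get_complete_testing_sets playlists test_indices_dict)

-- ===== LEMMAS AND PROOFS =====

-- the two in-place updates write the same dict (A re-reads 'tracks' after the 'seed' write)
theorem pvSeedA_eq_pvSeedB : pvSeedA = pvSeedB := by
  funext key p
  show (((PySem.Dict.mk p).insert "seed" _).insert "groundtruth"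
      (PySem.List.slice (((PySem.Dict.mk p).insert "seed"
        (PySem.List.slice ((PySem.Dict.mk p).getD "tracks" []) none (some key))).getD "tracks" [])
        (some key) none)).items = _
  rw [PySem.Dict.getD_insert_of_ne _ _ _ (by decide : ("tracks" : String) ≠ "seed")]
  rfl

-- the common shape both ports reduce to, parameterized by the per-bucket selections
def pvCommon (playlists : List (List (String × List Int))) (sel : List (Int × List Int)) : List (Int × List (List (String × List Int))) :=
  let store :=
    sel.foldl (fun st ks =>
      ks.2.foldl (fun st i =>
        PySem.List.pySetD st i (pvSeedB ks.1 (PySem.List.pyGetD st i []))) st) playlists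
  sel.map (fun ks => (ks.1, ks.2.map (fun i => PySem.List.pyGetD store i [])))

-- A's selection of a bucket equals B's: scanning enumerate(playlists) for membership in
-- idxs produces exactly the ascending list of in-range elements of idxs
theorem pvSel_eq (playlists : List (List (String × List Int))) (idxs : List Int) :
    ((PySem.List.enumerate playlists).filter
        (fun xy => idxs.contains xy.1)).map (fun xy => xy.1)
      = PySem.List.sorted (PySem.Set.ofList (idxs.filter
          (fun i => decide (0 ≤ i) && decide (i < PySem.List.len playlists)))) (fun x => x) := by
  have hL : ((PySem.List.enumerate playlists).filter
        (fun xy => idxs.contains xy.1)).map (fun xy : Int × List (String × List Int) => xy.1)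
      = (PySem.List.pyRange 0 (PySem.List.len playlists)).filter (fun j => idxs.contains j) := by
    rw [PySem.List.enumerate_eq_map_pyRange playlists []]
    rw [List.filter_map, List.map_map]
    simp [Function.comp_def]
  rw [hL]
  refine (PySem.List.sorted_eq_of_perm_of_pairwise_lt _ _ _ ?_ ?_).symm
  · -- permutation: both sides are Nodup with the same members
    have hnd1 : ((PySem.List.pyRange 0 (PySem.List.len playlists)).filter
        (fun j => idxs.contains j)).Nodup := by
      have := (PySem.List.pairwise_lt_pyRange_one 0 (PySem.List.len playlists)).filter
        (fun j => idxs.contains j)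
      exact this.imp ne_of_lt
    refine (List.perm_ext_iff_of_nodup hnd1 (PySem.Set.nodup_ofList _)).mpr ?_
    intro x
    simp [PySem.Set.mem_ofList, PySem.List.mem_pyRange_one, PySem.List.len_eq]
    tauto
  · exact (PySem.List.pairwise_lt_pyRange_one 0 (PySem.List.len playlists)).filter _

-- B's port is pvCommon applied to B's selections (definitional)
theorem alt_eq_common (playlists : List (List (String × List Int))) (test_indices_dict : List (Int × List Int)) :
    get_complete_testing_sets_alt playlists test_indices_dict
      = pvCommon playlists ((PySem.Dict.ofList test_indices_dict).items.map (fun kv =>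
          (kv.1, PySem.List.sorted (PySem.Set.ofList (kv.2.filter
            (fun i => decide (0 ≤ i) && decide (i < PySem.List.len playlists)))) (fun x => x)))) := rfl

-- A's return_dict, as an items list
theorem a_rd_items (playlists : List (List (String × List Int))) (test_indices_dict : List (Int × List Int)) :
    ((PySem.Dict.ofList test_indices_dict).keys.foldl (fun rd bucket =>
        rd.insert bucket (((PySem.List.enumerate playlists).filter
          (fun xy => ((PySem.Dict.ofList test_indices_dict).getD bucket []).contains xy.1)).map (fun xy => xy.1)))
        PySem.Dict.empty).items
      = (PySem.Dict.ofList test_indices_dict).items.map (fun kv =>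
          (kv.1, ((PySem.List.enumerate playlists).filter
            (fun xy => kv.2.contains xy.1)).map (fun xy => xy.1))) := by
  rw [PySem.Dict.items_foldl_insert_fresh (k := fun b => b)
      (v := fun b => ((PySem.List.enumerate playlists).filter
        (fun xy => ((PySem.Dict.ofList test_indices_dict).getD b []).contains xy.1)).map (fun xy => xy.1))
      (PySem.Dict.ofList test_indices_dict).keys PySem.Dict.empty
      (fun a _ => PySem.Dict.contains_empty a)
      (by rw [show (fun (b : Int) => b) = id from rfl, List.map_id]
          exact PySem.Dict.nodup_keys_ofList test_indices_dict)]
  have hkeys : (PySem.Dict.ofList test_indices_dict).keys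
      = (PySem.Dict.ofList test_indices_dict).items.map Prod.fst := rfl
  have hemp : (PySem.Dict.empty : PySem.Dict Int (List Int)).items = [] := rfl
  rw [hemp, List.nil_append, hkeys, List.map_map]
  refine List.map_congr_left (fun kv hm => ?_)
  have hget : (PySem.Dict.ofList test_indices_dict).getD kv.1 [] = kv.2 :=
    PySem.Dict.getD_of_mem_items (PySem.Dict.ofList test_indices_dict) (by simpa using hm)
      (PySem.Dict.nodup_keys_ofList test_indices_dict) []
  simp [hget]

-- a dict whose items are L, read out through keys/getD, is pvCommon on L
theorem pvDictLoop (playlists : List (List (String × List Int)))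
    (rd : PySem.Dict Int (List Int)) (L : List (Int × List Int))
    (hit : rd.items = L) (hnd : rd.keys.Nodup) :
    rd.keys.map (fun k => (k, (rd.getD k []).map (fun i => PySem.List.pyGetD
      (rd.keys.foldl (fun st key =>
        (rd.getD key []).foldl (fun st i =>
          PySem.List.pySetD st i (pvSeedB key (PySem.List.pyGetD st i []))) st) playlists) i [])))
    = pvCommon playlists L := by
  have hkeys : rd.keys = L.map Prod.fst := by
    show rd.items.map Prod.fst = L.map Prod.fst
    rw [hit]
  have hget : ∀ kv ∈ L, rd.getD kv.1 [] = kv.2 := by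
    intro kv hm
    exact PySem.Dict.getD_of_mem_items rd (by rw [hit]; simpa using hm) hnd []
  have hstore : rd.keys.foldl (fun st key =>
        (rd.getD key []).foldl (fun st i =>
          PySem.List.pySetD st i (pvSeedB key (PySem.List.pyGetD st i []))) st) playlists
      = L.foldl (fun st ks =>
        ks.2.foldl (fun st i =>
          PySem.List.pySetD st i (pvSeedB ks.1 (PySem.List.pyGetD st i []))) st) playlists := by
    rw [hkeys, List.foldl_map]
    exact PySem.List.foldl_congr_mem _ _ _ _ (fun st kv hm => by rw [hget kv hm])
  unfold pvCommon
  rw [hstore, hkeys, List.map_map]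
  exact List.map_congr_left (fun kv hm => by simp [hget kv hm])

-- A's port is pvCommon applied to the same selections
theorem a_eq_common (playlists : List (List (String × List Int))) (test_indices_dict : List (Int × List Int)) :
    get_complete_testing_sets playlists test_indices_dict
      = pvCommon playlists ((PySem.Dict.ofList test_indices_dict).items.map (fun kv =>
          (kv.1, ((PySem.List.enumerate playlists).filter
            (fun xy => kv.2.contains xy.1)).map (fun xy => xy.1)))) := by
  unfold get_complete_testing_sets
  rw [pvSeedA_eq_pvSeedB]
  refine pvDictLoop playlists _ _ (a_rd_items playlists test_indices_dict) ?_
  have h := a_rd_items playlists test_indices_dict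
  have : (PySem.Dict.keys (PySem.Dict.ofList test_indices_dict) |>.foldl (fun rd bucket =>
        rd.insert bucket (((PySem.List.enumerate playlists).filter
          (fun xy => ((PySem.Dict.ofList test_indices_dict).getD bucket []).contains xy.1)).map (fun xy => xy.1)))
        PySem.Dict.empty).keys
      = (PySem.Dict.ofList test_indices_dict).keys := by
    show (_ : PySem.Dict Int (List Int)).items.map Prod.fst = _
    rw [h, List.map_map]
    rfl
  rw [this]
  exact PySem.Dict.nodup_keys_ofList test_indices_dict

-- ===== VERDICT (by name: the statement is the Claim_ definition above) =====
theorem get_complete_testing_sets_spec : Claim_equal_get_complete_testing_sets := by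
  intro playlists test_indices_dict _ _
  unfold Spec_get_complete_testing_sets
  rw [a_eq_common, alt_eq_common]
  congr 1
  refine List.map_congr_left (fun kv _ => ?_)
  rw [pvSel_eq]
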